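-- pv_equiv track=rewrite | github.com/ka-sk/ZTO7 | first.py | calculate_criteria
-- ===== SOURCE A (Python) =====
-- def calculate_completion_times(pi, p):
--     """Calculate completion times for all jobs in schedule pi"""
--     n = len(pi)
--     C = [[0 for _ in range(n)] for _ in range(3)]
--
--     for j in range(n):
--         for i in range(3):
--             if j == 0 and i == 0:
--                 C[i][j] = p[i][pi[j]]
--             elif j == 0 and i > 0:
--                 C[i][j] = C[i - 1][j] + p[i][pi[j]]
--             elif j > 0 and i == 0:
--                 C[i][j] = C[i][j - 1] + p[i][pi[j]]
--             else:
--                 C[i][j] = max(C[i - 1][j], C[i][j - 1]) + p[i][pi[j]]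
--
--     return C
--
-- def calculate_criteria(pi, p, d):
--     """Calculate various criteria for a schedule pi"""
--     C = calculate_completion_times(pi, p)
--     n = len(pi)
--
--     # Criterion 1: Maximum completion time (makespan)
--     cmax = max(C[2])
--
--     # Criterion 3: Maximum tardiness
--     max_tardiness = float("-inf")
--     for j in range(n):
--         completion_time = C[2][j]
--         job_index = pi[j]
--         tardiness = max(completion_time - d[job_index], 0)
--         max_tardiness = max(max_tardiness, tardiness)
--
--     # Criterion 4: Total tardiness
--     sum_tardiness = 0
--     for j in range(n):
--         completion_time = C[2][j]
--         job_index = pi[j]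
--         tardiness = max(completion_time - d[job_index], 0)
--         sum_tardiness += tardiness
--
--     return cmax, max_tardiness, sum_tardiness
-- ===== SOURCE B (Python) =====
-- def calculate_criteria(pi, p, d):
--     """Critical-path reformulation: instead of the completion-time DP recurrence,
--     C3 at position j equals S2(j) + max_{b<=j}(C2(b) - S2(b-1)) with
--     C2(b) = S1(b) + max_{a<=b}(S0(a) - S1(a-1)), where Si are prefix sums of the
--     machine rows along pi. One pass maintains the three prefix sums and the two
--     running slack maxima; no completion-time matrix or DP recurrence."""
--     if not pi:
--         raise ValueError("empty schedule")
--     s0 = s1 = s2 = 0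
--     m0 = m1 = None
--     cmax = None
--     max_tardiness = None
--     sum_tardiness = 0
--     for job in pi:
--         s0 += p[0][job]
--         m0 = s0 - s1 if m0 is None else max(m0, s0 - s1)
--         s1 += p[1][job]
--         m1 = s1 + m0 - s2 if m1 is None else max(m1, s1 + m0 - s2)
--         s2 += p[2][job]
--         c = s2 + m1
--         cmax = c if cmax is None else max(cmax, c)
--         t = max(c - d[job], 0)
--         max_tardiness = t if max_tardiness is None else max(max_tardiness, t)
--         sum_tardiness += t
--     return cmax, max_tardiness, sum_tardiness
-- ===== Notes on version B (the rewrite author's own statement) =====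
-- stated objective: alternative
-- what changed: Replaces the 3xn completion-time DP (matrix filled by the max-recurrence, then three separate criterion passes) with the critical-path reformulation of the 3-machine flow shop: one pass keeps the prefix sums S0,S1,S2 of the machine rows along pi and the running slack maxima m0=max(S0(a)-S1(a-1)) and m1=max(C2(b)-S2(b-1)), from which each machine-3 completion is S2(j)+m1; the criteria are accumulated from those values, no completion-time matrix or DP recurrence appears.
import Mathlib
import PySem

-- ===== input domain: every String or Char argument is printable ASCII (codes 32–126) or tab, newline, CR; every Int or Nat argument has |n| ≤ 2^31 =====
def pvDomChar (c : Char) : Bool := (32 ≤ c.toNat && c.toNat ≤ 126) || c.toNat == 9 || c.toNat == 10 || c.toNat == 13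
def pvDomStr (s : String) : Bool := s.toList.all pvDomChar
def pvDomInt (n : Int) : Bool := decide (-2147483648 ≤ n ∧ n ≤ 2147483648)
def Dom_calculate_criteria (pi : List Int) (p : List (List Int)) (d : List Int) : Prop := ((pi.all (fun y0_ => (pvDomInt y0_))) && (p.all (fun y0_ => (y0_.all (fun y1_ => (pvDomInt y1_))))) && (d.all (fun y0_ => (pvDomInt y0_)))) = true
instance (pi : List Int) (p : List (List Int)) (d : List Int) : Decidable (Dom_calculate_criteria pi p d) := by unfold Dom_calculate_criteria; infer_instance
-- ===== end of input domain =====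

-- B drops A's 3×n completion-time DP entirely: it uses the critical-path reformulation
-- (machine-3 completion = S2(j) + running max of slack terms over prefix sums) in one pass.

-- ===== PORT A =====
-- p[i][job] (job may be negative: Python wraparound); total form, exact under Pre_ (in-range)
def pvJobP (p : List (List Int)) (i : Nat) (job : Int) : Int :=
  PySem.List.pyGetD (p.getD i []) job 0

def pvGet2 (C : List (List Int)) (i j : Nat) : Int := (C.getD i []).getD j 0
def pvSet2 (C : List (List Int)) (i j : Nat) (v : Int) : List (List Int) :=
  C.set i ((C.getD i []).set j v)

-- body of A's inner 'for i in range(3)' loop, branches in source order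
def pvInner (p : List (List Int)) (pi : List Int) (j : Nat)
    (C : List (List Int)) (i : Nat) : List (List Int) :=
  let pij := pvJobP p i (pi.getD j 0)
  if j = 0 ∧ i = 0 then pvSet2 C i j pij
  else if j = 0 ∧ i > 0 then pvSet2 C i j (pvGet2 C (i-1) j + pij)
  else if j > 0 ∧ i = 0 then pvSet2 C i j (pvGet2 C i (j-1) + pij)
  else pvSet2 C i j (max (pvGet2 C (i-1) j) (pvGet2 C i (j-1)) + pij)

def calculate_completion_times (pi : List Int) (p : List (List Int)) : List (List Int) :=
  let n := pi.length
  (List.range n).foldl (fun C j => (List.range 3).foldl (pvInner p pi j) C)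
    (List.replicate 3 (List.replicate n 0))

def calculate_criteria (pi : List Int) (p : List (List Int)) (d : List Int) : Int × Int × Int :=
  let C := calculate_completion_times pi p
  let n := pi.length
  let row2 := C.getD 2 []
  -- max(C[2]); raises on empty pi — excluded by Pre_
  let cmax := (PySem.List.max? row2 (fun x => x)).getD 0
  -- max_tardiness: float('-inf') start modelled as 'none' (never the result under Pre_)
  let maxT := ((List.range n).foldl (fun (m : Option Int) j =>
      let t := max (row2.getD j 0 - PySem.List.pyGetD d (pi.getD j 0) 0) 0
      match m with | none => some t | some v => some (max v t)) none).getD 0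
  let sumT := (List.range n).foldl (fun s j =>
      s + max (row2.getD j 0 - PySem.List.pyGetD d (pi.getD j 0) 0) 0) 0
  (cmax, maxT, sumT)

-- ===== PORT B =====
-- p[i][job] as Source B reads it (same Python semantics, B's own helper)
def pvJobB (p : List (List Int)) (i : Nat) (job : Int) : Int :=
  PySem.List.pyGetD (p.getD i []) job 0

-- one iteration of Source B's loop: state (s0, s1, s2, m0, m1, cmax, max_tardiness, sum_tardiness),
-- the 'None' initial values of m0/m1/cmax/max_tardiness modelled as Option Int
def pvBStep (p : List (List Int)) (d : List Int)
    (st : Int × Int × Int × Option Int × Option Int × Option Int × Option Int × Int)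
    (job : Int) : Int × Int × Int × Option Int × Option Int × Option Int × Option Int × Int :=
  let s0 := st.1 + pvJobB p 0 job
  let m0 := match st.2.2.2.1 with | none => s0 - st.2.1 | some v => max v (s0 - st.2.1)
  let s1 := st.2.1 + pvJobB p 1 job
  let m1 := match st.2.2.2.2.1 with | none => s1 + m0 - st.2.2.1 | some v => max v (s1 + m0 - st.2.2.1)
  let s2 := st.2.2.1 + pvJobB p 2 job
  let c := s2 + m1
  let cm := match st.2.2.2.2.2.1 with | none => c | some v => max v c
  let t := max (c - PySem.List.pyGetD d job 0) 0
  let mt := match st.2.2.2.2.2.2.1 with | none => t | some v => max v t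
  (s0, s1, s2, some m0, some m1, some cm, some mt, st.2.2.2.2.2.2.2 + t)

def calculate_criteria_alt (pi : List Int) (p : List (List Int)) (d : List Int) : Int × Int × Int :=
  -- Python B raises ValueError on empty pi (excluded by Pre_); the getD defaults are never hit otherwise
  let r := pi.foldl (pvBStep p d) (0, 0, 0, none, none, none, none, 0)
  ((r.2.2.2.2.2.1).getD 0, (r.2.2.2.2.2.2.1).getD 0, r.2.2.2.2.2.2.2)

-- ===== PRECONDITION & SPEC =====
-- Pre_ excludes exactly the inputs where Python A raises: empty pi (max([]) → ValueError),
-- fewer than 3 machine rows in p (IndexError), or a job index of pi out of Python range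
-- for a row of p or for d (IndexError).
def Pre_calculate_criteria (pi : List Int) (p : List (List Int)) (d : List Int) : Prop :=
  pi ≠ [] ∧ 3 ≤ p.length ∧
  ∀ job ∈ pi, PySem.Raise.InRange (p.getD 0 []).length job ∧
              PySem.Raise.InRange (p.getD 1 []).length job ∧
              PySem.Raise.InRange (p.getD 2 []).length job ∧
              PySem.Raise.InRange d.length job
instance (pi : List Int) (p : List (List Int)) (d : List Int) : Decidable (Pre_calculate_criteria pi p d) := by unfold Pre_calculate_criteria; infer_instance

def pvWitness_calculate_criteria : List Int × List (List Int) × List Int :=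
  ([1, 0], [[2, 3], [1, 4], [5, 2]], [6, 9])

def Spec_calculate_criteria (pi : List Int) (p : List (List Int)) (d : List Int) (out : Int × Int × Int) : Prop := out = calculate_criteria_alt pi p d
instance (pi : List Int) (p : List (List Int)) (d : List Int) (out : Int × Int × Int) : Decidable (Spec_calculate_criteria pi p d out) := by unfold Spec_calculate_criteria; infer_instance

-- ===== CLAIM (what is proved, stated in full; the proofs are below) =====
def Claim_equal_calculate_criteria : Prop := ∀ (pi : List Int) (p : List (List Int)) (d : List Int), Dom_calculate_criteria pi p d → Pre_calculate_criteria pi p d → Spec_calculate_criteria pi p d (calculate_criteria pi p d)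

-- ===== LEMMAS AND PROOFS =====

-- the scalar machine-completion recurrence (proof-side abstraction of A's column update)
def pvStep (p : List (List Int)) (s : Int × Int × Int) (job : Int) : Int × Int × Int :=
  let c0 := s.1 + pvJobP p 0 job
  let c1 := max s.2.1 c0 + pvJobP p 1 job
  (c0, c1, max s.2.2 c1 + pvJobP p 2 job)

def pvInit (p : List (List Int)) (job : Int) : Int × Int × Int :=
  let c0 := pvJobP p 0 job
  let c1 := c0 + pvJobP p 1 job
  (c0, c1, c1 + pvJobP p 2 job)

-- history of scalar states: state before/after each job
def pvHist (p : List (List Int)) (s : Int × Int × Int) : List Int → List (Int × Int × Int)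
  | [] => [s]
  | j :: r => s :: pvHist p (pvStep p s j) r

-- (machine-3 completion, job) for each job processed after the first
def pvTail (p : List (List Int)) (s : Int × Int × Int) : List Int → List (Int × Int)
  | [] => []
  | j :: r => ((pvStep p s j).2.2, j) :: pvTail p (pvStep p s j) r

lemma pvHist_length (p : List (List Int)) (s : Int × Int × Int) (l : List Int) :
    (pvHist p s l).length = l.length + 1 := by
  induction l generalizing s with
  | nil => simp [pvHist]
  | cons j r ih => simp [pvHist, ih]

lemma pvHist_append (p : List (List Int)) (s : Int × Int × Int) (l : List Int) (j : Int) :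
    pvHist p s (l ++ [j]) = pvHist p s l ++ [pvStep p (l.foldl (pvStep p) s) j] := by
  induction l generalizing s with
  | nil => simp [pvHist]
  | cons a r ih => simp [pvHist, ih, List.foldl_cons]

lemma pvHist_map_getD_len (p : List (List Int)) (sel : Int × Int × Int → Int)
    (s : Int × Int × Int) (l : List Int) :
    ((pvHist p s l).map sel).getD l.length 0 = sel (l.foldl (pvStep p) s) := by
  induction l generalizing s with
  | nil => simp [pvHist]
  | cons a r ih =>
    simp only [pvHist, List.map_cons, List.length_cons, List.getD_cons_succ, List.foldl_cons]
    exact ih _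

lemma getD_append_len (a : List Int) (v : Int) (z : List Int) :
    (a ++ v :: z).getD a.length 0 = v := by
  induction a with
  | nil => simp
  | cons x xs _ => simp

lemma set_append_len (a b : List Int) (v : Int) :
    (a ++ b).set a.length v = a ++ b.set 0 v := by
  induction a with
  | nil => simp
  | cons x xs _ => simp

lemma set_append_len' (a b : List Int) (v : Int) (n : Nat) (h : n = a.length) :
    (a ++ b).set n v = a ++ b.set 0 v := by subst h; exact set_append_len a b v

lemma getD_append_len' (a : List Int) (v : Int) (z : List Int) (n : Nat) (h : n = a.length) :
    (a ++ v :: z).getD n 0 = v := by subst h; exact getD_append_len a v z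

lemma getD_append_lt (a b : List Int) (i : Nat) (h : i < a.length) :
    (a ++ b).getD i 0 = a.getD i 0 := by
  induction a generalizing i with
  | nil => simp at h
  | cons x xs ih =>
    cases i with
    | zero => simp
    | succ n => simp only [List.cons_append, List.getD_cons_succ]; exact ih n (by simpa using h)

set_option maxHeartbeats 1000000 in
lemma col_update (p : List (List Int)) (pi : List Int) (k m : Nat) (a0 a1 a2 : List Int)
    (h0 : a0.length = k+1) (h1 : a1.length = k+1) (h2 : a2.length = k+1) :
    (List.range 3).foldl (pvInner p pi (k+1))
      [a0 ++ List.replicate (m+1) 0, a1 ++ List.replicate (m+1) 0, a2 ++ List.replicate (m+1) 0]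
    = [a0 ++ (a0.getD k 0 + pvJobP p 0 (pi.getD (k+1) 0)) :: List.replicate m 0,
       a1 ++ (max (a0.getD k 0 + pvJobP p 0 (pi.getD (k+1) 0)) (a1.getD k 0)
              + pvJobP p 1 (pi.getD (k+1) 0)) :: List.replicate m 0,
       a2 ++ (max (max (a0.getD k 0 + pvJobP p 0 (pi.getD (k+1) 0)) (a1.getD k 0)
                    + pvJobP p 1 (pi.getD (k+1) 0)) (a2.getD k 0)
              + pvJobP p 2 (pi.getD (k+1) 0)) :: List.replicate m 0] := by
  have hr : List.range 3 = [0, 1, 2] := rfl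
  rw [hr]
  simp only [List.foldl_cons, List.foldl_nil]
  rw [List.replicate_succ]
  set j := pi.getD (k+1) 0 with hj
  set v0 := a0.getD k 0 + pvJobP p 0 j with hv0
  set v1 := max v0 (a1.getD k 0) + pvJobP p 1 j with hv1
  set v2 := max v1 (a2.getD k 0) + pvJobP p 2 j with hv2
  have e0 : pvInner p pi (k+1) [a0 ++ 0 :: List.replicate m 0, a1 ++ 0 :: List.replicate m 0,
      a2 ++ 0 :: List.replicate m 0] 0
      = [a0 ++ v0 :: List.replicate m 0, a1 ++ 0 :: List.replicate m 0,
         a2 ++ 0 :: List.replicate m 0] := by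
    simp only [pvInner, pvSet2, pvGet2, Nat.succ_ne_zero, false_and, if_false, and_true,
      Nat.add_sub_cancel, gt_iff_lt, Nat.zero_lt_succ, if_true, Nat.lt_irrefl,
      List.getD_cons_zero, List.set_cons_zero]
    rw [set_append_len' _ _ _ _ h0.symm, getD_append_lt a0 _ k (by omega)]
    simp [hv0, hj]
  have e1 : pvInner p pi (k+1) [a0 ++ v0 :: List.replicate m 0, a1 ++ 0 :: List.replicate m 0,
      a2 ++ 0 :: List.replicate m 0] 1
      = [a0 ++ v0 :: List.replicate m 0, a1 ++ v1 :: List.replicate m 0,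
         a2 ++ 0 :: List.replicate m 0] := by
    simp only [pvInner, pvSet2, pvGet2, Nat.succ_ne_zero, false_and, if_false,
      Nat.add_sub_cancel, gt_iff_lt, Nat.zero_lt_succ, and_false,
      List.getD_cons_zero, List.getD_cons_succ, List.set_cons_zero, List.set_cons_succ]
    rw [show (1 : Nat) - 1 = 0 from rfl]
    simp only [List.getD_cons_zero]
    rw [set_append_len' _ _ _ _ h1.symm, getD_append_len' _ _ _ _ h0.symm,
      getD_append_lt a1 _ k (by omega)]
    simp [hv1, hj]
  have e2 : pvInner p pi (k+1) [a0 ++ v0 :: List.replicate m 0, a1 ++ v1 :: List.replicate m 0,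
      a2 ++ 0 :: List.replicate m 0] 2
      = [a0 ++ v0 :: List.replicate m 0, a1 ++ v1 :: List.replicate m 0,
         a2 ++ v2 :: List.replicate m 0] := by
    simp only [pvInner, pvSet2, pvGet2, Nat.succ_ne_zero, false_and, if_false,
      Nat.add_sub_cancel, gt_iff_lt, Nat.zero_lt_succ, and_false,
      List.getD_cons_zero, List.getD_cons_succ, List.set_cons_succ]
    rw [set_append_len' _ _ _ _ h2.symm, getD_append_len' _ _ _ _ h1.symm,
      getD_append_lt a2 _ k (by omega)]
    simp [hv2, hj]
  rw [e0, e1, e2]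

-- the matrix invariant: after columns 0..k the matrix rows are the scalar histories padded with zeros
lemma matrix_inv (p : List (List Int)) (f : Int) (rest : List Int) (k : Nat)
    (hk : k ≤ rest.length) :
    (List.range (k+1)).foldl (fun C j => (List.range 3).foldl (pvInner p (f :: rest) j) C)
      (List.replicate 3 (List.replicate (rest.length + 1) 0)) =
    [((pvHist p (pvInit p f) (rest.take k)).map (·.1)) ++ List.replicate (rest.length - k) 0,
     ((pvHist p (pvInit p f) (rest.take k)).map (·.2.1)) ++ List.replicate (rest.length - k) 0,
     ((pvHist p (pvInit p f) (rest.take k)).map (·.2.2)) ++ List.replicate (rest.length - k) 0] := by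
  induction k with
  | zero =>
    have hr1 : List.range 1 = [0] := rfl
    rw [hr1]
    simp only [List.foldl_cons, List.foldl_nil, List.take_zero, pvHist, pvInit]
    have hr : List.range 3 = [0, 1, 2] := rfl
    rw [hr]
    simp only [List.foldl_cons, List.foldl_nil, List.replicate]
    simp [pvInner, pvSet2, pvGet2, List.getD, List.set]
  | succ k ih =>
    have hk' : k ≤ rest.length := by omega
    have hkl : k < rest.length := by omega
    rw [show List.range (k+1+1) = List.range (k+1) ++ [k+1] from List.range_succ,
      List.foldl_append, ih hk']
    simp only [List.foldl_cons, List.foldl_nil]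
    have hm : rest.length - k = (rest.length - (k+1)) + 1 := by omega
    have hlen0 : ((pvHist p (pvInit p f) (rest.take k)).map (·.1)).length = k + 1 := by
      simp [pvHist_length, List.length_take, Nat.min_eq_left hk']
    have hlen1 : ((pvHist p (pvInit p f) (rest.take k)).map (·.2.1)).length = k + 1 := by
      simp [pvHist_length, List.length_take, Nat.min_eq_left hk']
    have hlen2 : ((pvHist p (pvInit p f) (rest.take k)).map (·.2.2)).length = k + 1 := by
      simp [pvHist_length, List.length_take, Nat.min_eq_left hk']
    rw [hm, col_update p (f :: rest) k (rest.length - (k+1)) _ _ _ hlen0 hlen1 hlen2]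
    have htk : (rest.take k).length = k := by simp [Nat.min_eq_left hk']
    have hg0 := pvHist_map_getD_len p (·.1) (pvInit p f) (rest.take k)
    have hg1 := pvHist_map_getD_len p (·.2.1) (pvInit p f) (rest.take k)
    have hg2 := pvHist_map_getD_len p (·.2.2) (pvInit p f) (rest.take k)
    rw [htk] at hg0 hg1 hg2
    rw [hg0, hg1, hg2]
    have htake : rest.take (k+1) = rest.take k ++ [rest.getD k 0] := by
      rw [List.take_add_one]
      congr 1
      simp [List.getElem?_eq_getElem hkl, List.getD]
    rw [htake, pvHist_append]
    have hpi : (f :: rest).getD (k+1) 0 = rest.getD k 0 := rfl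
    rw [hpi]
    set F := (rest.take k).foldl (pvStep p) (pvInit p f) with hF
    simp only [List.map_append, List.map_cons, List.map_nil, List.append_assoc,
      List.cons_append, List.nil_append, pvStep]
    simp [max_comm]

lemma matrix_eq (p : List (List Int)) (f : Int) (rest : List Int) :
    calculate_completion_times (f :: rest) p =
    [(pvHist p (pvInit p f) rest).map (·.1),
     (pvHist p (pvInit p f) rest).map (·.2.1),
     (pvHist p (pvInit p f) rest).map (·.2.2)] := by
  have h := matrix_inv p f rest rest.length le_rfl
  simpa [calculate_completion_times, List.take_length] using h

-- range-indexed two-list fold is the fold over the zip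
lemma foldl_range_zip {β : Type} (g : β → Int → Int → β) :
    ∀ (xs ys : List Int) (init : β), xs.length = ys.length →
    (List.range xs.length).foldl (fun acc j => g acc (xs.getD j 0) (ys.getD j 0)) init
    = (xs.zip ys).foldl (fun acc xy => g acc xy.1 xy.2) init := by
  intro xs
  induction xs with
  | nil => intro ys init _; simp
  | cons x xs' ih =>
    intro ys init h
    cases ys with
    | nil => simp at h
    | cons y ys' =>
      simp only [List.length_cons, List.range_succ_eq_map, List.foldl_cons, List.foldl_map,
        List.getD_cons_zero, List.getD_cons_succ, List.zip_cons_cons]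
      exact ih ys' (g init x y) (by simpa using h)

lemma hist_map_eq_cons (p : List (List Int)) (l : List Int) (s : Int × Int × Int) :
    (pvHist p s l).map (·.2.2) = s.2.2 :: (pvTail p s l).map (·.1) := by
  induction l generalizing s with
  | nil => simp [pvHist, pvTail]
  | cons j r ih => simp [pvHist, pvTail, ih]

lemma zip_hist (p : List (List Int)) (l : List Int) (s : Int × Int × Int) (x : Int) :
    ((pvHist p s l).map (·.2.2)).zip (x :: l) = (s.2.2, x) :: pvTail p s l := by
  induction l generalizing s x with
  | nil => simp [pvHist, pvTail]
  | cons j r ih => simp [pvHist, pvTail, ih]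

lemma opt_fold (tt : Int × Int → Int) :
    ∀ (l : List (Int × Int)) (v : Int),
    l.foldl (fun (m : Option Int) x =>
        match m with | none => some (tt x) | some a => some (max a (tt x))) (some v)
    = some (l.foldl (fun a x => max a (tt x)) v) := by
  intro l
  induction l with
  | nil => intro v; rfl
  | cons x r ih => intro v; simp only [List.foldl_cons]; exact ih _

-- prefix-sum helper for a machine row
def pvSum (p : List (List Int)) (i : Nat) (l : List Int) (s : Int) : Int :=
  l.foldl (fun a j => a + pvJobP p i j) s

-- B's fold, characterized: s0/s1/s2 are prefix sums, s1+m0 and s2+m1 are the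
-- machine-2 and machine-3 completion times of the scalar recurrence, and the
-- aggregates are folds over the pvTail value stream.
lemma B_fold (p : List (List Int)) (d : List Int) :
    ∀ (l : List Int) (s0 s1 s2 m0 m1 cm mt su : Int),
    l.foldl (pvBStep p d) (s0, s1, s2, some m0, some m1, some cm, some mt, su)
    = ((l.foldl (pvStep p) (s0, s1 + m0, s2 + m1)).1,
       pvSum p 1 l s1,
       pvSum p 2 l s2,
       some ((l.foldl (pvStep p) (s0, s1 + m0, s2 + m1)).2.1 - pvSum p 1 l s1),
       some ((l.foldl (pvStep p) (s0, s1 + m0, s2 + m1)).2.2 - pvSum p 2 l s2),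
       some ((pvTail p (s0, s1 + m0, s2 + m1) l).foldl (fun a x => max a x.1) cm),
       some ((pvTail p (s0, s1 + m0, s2 + m1) l).foldl
              (fun a x => max a (max (x.1 - PySem.List.pyGetD d x.2 0) 0)) mt),
       (pvTail p (s0, s1 + m0, s2 + m1) l).foldl
         (fun a x => a + max (x.1 - PySem.List.pyGetD d x.2 0) 0) su) := by
  intro l
  induction l with
  | nil =>
    intro s0 s1 s2 m0 m1 cm mt su
    simp [pvSum, pvTail]
  | cons j r ih =>
    intro s0 s1 s2 m0 m1 cm mt su
    have hstep : pvBStep p d (s0, s1, s2, some m0, some m1, some cm, some mt, su) j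
        = (s0 + pvJobB p 0 j,
           s1 + pvJobB p 1 j,
           s2 + pvJobB p 2 j,
           some (max m0 (s0 + pvJobB p 0 j - s1)),
           some (max m1 (s1 + pvJobB p 1 j + max m0 (s0 + pvJobB p 0 j - s1) - s2)),
           some (max cm (s2 + pvJobB p 2 j
              + max m1 (s1 + pvJobB p 1 j + max m0 (s0 + pvJobB p 0 j - s1) - s2))),
           some (max mt (max ((s2 + pvJobB p 2 j
              + max m1 (s1 + pvJobB p 1 j + max m0 (s0 + pvJobB p 0 j - s1) - s2))
              - PySem.List.pyGetD d j 0) 0)),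
           su + max ((s2 + pvJobB p 2 j
              + max m1 (s1 + pvJobB p 1 j + max m0 (s0 + pvJobB p 0 j - s1) - s2))
              - PySem.List.pyGetD d j 0) 0) := rfl
    have hJB : pvJobB = pvJobP := rfl
    have hc : ((s0 + pvJobB p 0 j),
        (s1 + pvJobB p 1 j) + max m0 (s0 + pvJobB p 0 j - s1),
        (s2 + pvJobB p 2 j) + max m1 (s1 + pvJobB p 1 j + max m0 (s0 + pvJobB p 0 j - s1) - s2))
        = pvStep p (s0, s1 + m0, s2 + m1) j := by
      simp only [pvStep, hJB]
      refine Prod.ext (by rfl) (Prod.ext ?_ ?_) <;> simp only [] <;> omega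
    have hc2 : (s2 + pvJobB p 2 j
        + max m1 (s1 + pvJobB p 1 j + max m0 (s0 + pvJobB p 0 j - s1) - s2))
        = (pvStep p (s0, s1 + m0, s2 + m1) j).2.2 := congrArg (·.2.2) hc
    rw [List.foldl_cons, hstep, ih, hc, hc2]
    rw [show pvTail p (s0, s1 + m0, s2 + m1) (j :: r)
        = ((pvStep p (s0, s1 + m0, s2 + m1) j).2.2, j)
          :: pvTail p (pvStep p (s0, s1 + m0, s2 + m1) j) r from rfl]
    simp only [pvSum, List.foldl_cons]
    rfl

-- ===== VERDICT (by name: the statement is the Claim_ definition above) =====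
theorem calculate_criteria_spec : Claim_equal_calculate_criteria := by
  intro pi p d _ hpre
  unfold Spec_calculate_criteria
  obtain ⟨hne, -, -⟩ := hpre
  cases pi with
  | nil => exact absurd rfl hne
  | cons f rest =>
    -- the first iteration of B's loop, from the all-None initial state (definitional)
    have hfirst : pvBStep p d (0, 0, 0, none, none, none, none, 0) f
        = (0 + pvJobB p 0 f, 0 + pvJobB p 1 f, 0 + pvJobB p 2 f,
           some (0 + pvJobB p 0 f - 0),
           some (0 + pvJobB p 1 f + (0 + pvJobB p 0 f - 0) - 0),
           some (0 + pvJobB p 2 f + (0 + pvJobB p 1 f + (0 + pvJobB p 0 f - 0) - 0)),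
           some (max ((0 + pvJobB p 2 f + (0 + pvJobB p 1 f + (0 + pvJobB p 0 f - 0) - 0))
              - PySem.List.pyGetD d f 0) 0),
           0 + max ((0 + pvJobB p 2 f + (0 + pvJobB p 1 f + (0 + pvJobB p 0 f - 0) - 0))
              - PySem.List.pyGetD d f 0) 0) := rfl
    have hJB : pvJobB = pvJobP := rfl
    have hbase : ((pvJobB p 0 f : Int),
        pvJobB p 1 f + pvJobB p 0 f,
        pvJobB p 2 f + (pvJobB p 1 f + pvJobB p 0 f)) = pvInit p f := by
      simp only [pvInit, hJB]
      refine Prod.ext (by rfl) (Prod.ext ?_ ?_) <;> simp only [] <;> omega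
    have hc2i : (pvJobB p 2 f + (pvJobB p 1 f + pvJobB p 0 f) : Int)
        = (pvInit p f).2.2 := congrArg (·.2.2) hbase
    simp only [calculate_criteria, calculate_criteria_alt, matrix_eq, List.foldl_cons, hfirst]
    rw [B_fold]
    simp only [zero_add, sub_zero]
    rw [hbase, hc2i]
    -- now reduce A's side to the same pvTail folds
    set s0 := pvInit p f with hs0
    set H := pvHist p s0 rest with hH
    have hlen : (f :: rest).length = (H.map (·.2.2)).length := by
      simp [hH, pvHist_length]
    have hrow2 : List.getD [H.map (·.1), H.map (·.2.1), H.map (·.2.2)] 2 [] = H.map (·.2.2) := by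
      rfl
    rw [hrow2, hlen]
    rw [foldl_range_zip (fun (m : Option Int) x y =>
        match m with
        | none => some (max (x - PySem.List.pyGetD d y 0) 0)
        | some v => some (max v (max (x - PySem.List.pyGetD d y 0) 0)))
      (H.map (·.2.2)) (f :: rest) none hlen.symm]
    rw [foldl_range_zip (fun (acc : Int) x y => acc + max (x - PySem.List.pyGetD d y 0) 0)
      (H.map (·.2.2)) (f :: rest) 0 hlen.symm]
    rw [hH, zip_hist, hist_map_eq_cons]
    rw [PySem.List.max?_id_cons]
    simp only [List.foldl_cons, List.foldl_map, Option.getD_some, zero_add]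
    rw [opt_fold]
    rfl
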